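-- pv_equiv track=rewrite | github.com/tsostanov/lab4_inf | main.py | get_information
-- ===== SOURCE A (Python) =====
-- def get_information(pattern_information, information):
--     pattern_keys = [i for i in pattern_information.keys()]
--     while '"' in information:
--         delta = information[:information.index('"')]
--         information = information[(information.index('"') + 1):]
--         if delta in pattern_keys:
--             information = information[(information.index('"') + 1):]
--             pattern_information[delta] = information[:information.index('"')]
--     return pattern_information
-- ===== SOURCE B (Python) =====
-- def get_information(pattern_information, information):
--     segments = information.split('"')
--     keys = set(pattern_information)
--     n = len(segments)
--     i = 0
--     while i + 1 < n:
--         key = segments[i]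
--         if key in keys:
--             pattern_information[key] = segments[i + 2]
--             i += 2
--         else:
--             i += 1
--     return pattern_information
-- ===== Notes on version B (the rewrite author's own statement) =====
-- stated objective: alternative
-- what changed: B splits the string on '"' once and walks the segment list with an integer cursor (advancing 1 on a non-key segment, 2 on a key, writing segments[i+2] as the value), instead of A's repeated index('"') scans and slice reassignments of the shrinking string.
import Mathlib
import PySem

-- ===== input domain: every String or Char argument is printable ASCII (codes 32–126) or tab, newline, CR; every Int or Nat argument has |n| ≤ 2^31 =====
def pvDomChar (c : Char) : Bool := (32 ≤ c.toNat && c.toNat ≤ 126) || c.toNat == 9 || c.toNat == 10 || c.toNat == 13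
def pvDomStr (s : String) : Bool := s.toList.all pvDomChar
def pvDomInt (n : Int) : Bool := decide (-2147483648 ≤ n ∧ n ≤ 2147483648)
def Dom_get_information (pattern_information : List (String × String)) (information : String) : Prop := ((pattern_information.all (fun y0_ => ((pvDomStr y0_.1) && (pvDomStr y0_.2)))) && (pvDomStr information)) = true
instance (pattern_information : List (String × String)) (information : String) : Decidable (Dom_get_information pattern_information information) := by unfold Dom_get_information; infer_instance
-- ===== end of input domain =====

-- B replaces A's repeated index('"')-scan-and-slice loop over a shrinking string by one split('"')
-- and a cursor walk over the segment list (a different algorithm, similar cost); A mutates its dict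
-- argument in place, B mutates it the same way; the equivalence proved is about the returned items.

-- ===== PORT A =====
-- termination helper for goA: cutting a string just after a present '"' strictly shortens it
theorem pvLenAfterQuote (t : List Char) (h : PySem.Chars.isIn ['"'] t = true) :
    (PySem.List.slice t (some (PySem.Chars.find t ['"'] + 1)) none).length < t.length := by
  have hinf : ['"'] <:+: t := (PySem.Chars.isIn_iff_infix _ _).mp h
  have hf : 0 ≤ PySem.Chars.find t ['"'] := (PySem.Chars.find_nonneg_iff _ _).mpr hinf
  have ht : t ≠ [] := by
    rintro rfl
    simpa using hinf.sublist.length_le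
  rw [PySem.List.slice_from t (by omega)]
  have h1 : 1 ≤ (PySem.Chars.find t ['"'] + 1).toNat := by omega
  have h2 : 0 < t.length := List.length_pos_iff.mpr ht
  simp only [List.length_drop]
  omega

-- the while loop of A: each iteration cuts `information` at the first '"' (A's `.index`/slices);
-- the two `else d` branches are where Python's unguarded `.index('"')` raises ValueError (excluded by Pre_)
def goA (keys : List (List Char)) (d : PySem.Dict (List Char) (List Char)) (s : List Char) :
    PySem.Dict (List Char) (List Char) :=
  if h : PySem.Chars.isIn ['"'] s = true then
    let delta := PySem.List.slice s none (some (PySem.Chars.find s ['"']))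
    let s1 := PySem.List.slice s (some (PySem.Chars.find s ['"'] + 1)) none
    if keys.contains delta then
      if h2 : PySem.Chars.isIn ['"'] s1 = true then
        let s2 := PySem.List.slice s1 (some (PySem.Chars.find s1 ['"'] + 1)) none
        if PySem.Chars.isIn ['"'] s2 = true then
          goA keys (d.insert delta (PySem.List.slice s2 none (some (PySem.Chars.find s2 ['"'])))) s2
        else d
      else d
    else goA keys d s1
  else d
termination_by s.length
decreasing_by
  · exact lt_trans (pvLenAfterQuote _ h2) (pvLenAfterQuote _ h)
  · exact pvLenAfterQuote _ h

def get_information (pattern_information : List (String × String)) (information : String) :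
    List (String × String) :=
  let d := PySem.Dict.ofList (pattern_information.map (fun p => (p.1.toList, p.2.toList)))
  let pattern_keys := d.keys
  (goA pattern_keys d information.toList).items.map (fun p => (String.ofList p.1, String.ofList p.2))

-- ===== PORT B =====
-- the cursor loop of B over the segment list; the `none => d` branch under a key hit is where
-- Source B's `segments[i + 2]` raises IndexError (excluded by Pre_)
def goB (keys : PySem.Set (List Char)) (d : PySem.Dict (List Char) (List Char))
    (segments : List (List Char)) (i : Nat) : PySem.Dict (List Char) (List Char) :=
  if i + 1 < segments.length then
    match segments[i]? with
    | none => d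
    | some key =>
      if PySem.Set.contains keys key then
        match segments[i + 2]? with
        | none => d
        | some v => goB keys (d.insert key v) segments (i + 2)
      else goB keys d segments (i + 1)
  else d
termination_by segments.length - i

def get_information_alt (pattern_information : List (String × String)) (information : String) :
    List (String × String) :=
  let segments := PySem.Chars.splitOn information.toList ['"']
  let d := PySem.Dict.ofList (pattern_information.map (fun p => (p.1.toList, p.2.toList)))
  let keys := PySem.Set.ofList d.keys
  (goB keys d segments 0).items.map (fun p => (String.ofList p.1, String.ofList p.2))

-- ===== PRECONDITION & SPEC =====
-- crashesA replays only the scan CURSOR of A over the '"'-split segments of `information` (no dict,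
-- no values): it is true exactly when the cursor lands on a key segment that has fewer than two
-- segments after it — the positions where A's unguarded .index('"') raises ValueError.
def crashesA (keys : List (List Char)) (l : List (List Char)) : Bool :=
  match l with
  | [] => false
  | [_] => false
  | [a, _] => keys.contains a
  | [a, t, _] => keys.contains a || keys.contains t
  | a :: t :: v :: w :: r =>
    if keys.contains a then crashesA keys (v :: w :: r) else crashesA keys (t :: v :: w :: r)
termination_by structural l

-- Pre_ excludes exactly the inputs on which the Python A raises ValueError (see crashesA above);
-- on every input it admits A returns normally and B returns the same dict.
def Pre_get_information (pattern_information : List (String × String)) (information : String) : Prop :=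
  crashesA ((PySem.Dict.ofList (pattern_information.map (fun p => (p.1.toList, p.2.toList)))).keys)
    (PySem.Chars.splitOn information.toList ['"']) = false
instance (pattern_information : List (String × String)) (information : String) :
    Decidable (Pre_get_information pattern_information information) := by
  unfold Pre_get_information; infer_instance

def pvWitness_get_information : (List (String × String)) × String :=
  ([("name", "")], "\"name\" is \"john\"")

def Spec_get_information (pattern_information : List (String × String)) (information : String) (out : List (String × String)) : Prop := out = get_information_alt pattern_information information
instance (pattern_information : List (String × String)) (information : String) (out : List (String × String)) : Decidable (Spec_get_information pattern_information information out) := by unfold Spec_get_information; infer_instance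

-- ===== CLAIM (what is proved, stated in full; the proofs are below) =====
def Claim_equal_get_information : Prop := ∀ (pattern_information : List (String × String)) (information : String), Dom_get_information pattern_information information → Pre_get_information pattern_information information → Spec_get_information pattern_information information (get_information pattern_information information)

-- ===== LEMMAS AND PROOFS =====

-- a simple structural model of s.split('"')
def qsplit : List Char → List (List Char)
  | [] => [[]]
  | c :: rest => if c = '"' then [] :: qsplit rest else (qsplit rest).modifyHead (c :: ·)

-- A's loop abstracted over the split segments: A's cursor walk including its two stale-return
-- (ValueError) branches
def walkA (keys : List (List Char)) (d : PySem.Dict (List Char) (List Char))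
    (l : List (List Char)) : PySem.Dict (List Char) (List Char) :=
  match l with
  | [] => d
  | [_] => d
  | [_, _] => d
  | [_, _, _] => d
  | a :: t :: v :: w :: r =>
    if keys.contains a then walkA keys (d.insert a v) (v :: w :: r)
    else walkA keys d (t :: v :: w :: r)
termination_by structural l

-- B's cursor loop abstracted the same way
def walkB (keys : List (List Char)) (d : PySem.Dict (List Char) (List Char))
    (l : List (List Char)) : PySem.Dict (List Char) (List Char) :=
  match l with
  | [] => d
  | [_] => d
  | [_, _] => d
  | a :: t :: v :: r =>
    if keys.contains a then walkB keys (d.insert a v) (v :: r)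
    else walkB keys d (t :: v :: r)
termination_by structural l

theorem go_spec (l : List Char) : ∀ (fuel : Nat) (cur : List Char) (acc : List (List Char)),
    l.length ≤ fuel →
    PySem.Chars.splitOn.go ['"'] fuel l cur acc =
      acc.reverse ++ (qsplit l).modifyHead (cur.reverse ++ ·) := by
  induction l with
  | nil =>
    intro fuel cur acc _
    cases fuel <;> simp [PySem.Chars.splitOn.go, qsplit]
  | cons c rest ih =>
    intro fuel cur acc hf
    cases fuel with
    | zero => simp at hf
    | succ n =>
      rw [PySem.Chars.splitOn.go]
      by_cases hc : c = '"'
      · subst hc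
        have hp : List.isPrefixOf ['"'] ('"' :: rest) = true := by simp [List.isPrefixOf]
        rw [if_pos hp]
        simp only [List.length_cons, List.length_nil, List.drop_succ_cons, List.drop_zero]
        rw [ih n [] (cur.reverse :: acc) (by simpa using Nat.lt_succ_iff.mp (by simpa using hf))]
        simp [qsplit]
        cases qsplit rest <;> simp
      · have hp : List.isPrefixOf ['"'] (c :: rest) = false := by
          simp [List.isPrefixOf]; exact fun h => absurd h.symm hc
        rw [if_neg (by simp [hp])]
        rw [ih n (c :: cur) acc (by simp at hf; omega)]
        simp [qsplit, hc]
        cases qsplit rest <;> simp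

theorem splitOn_eq_qsplit (s : List Char) : PySem.Chars.splitOn s ['"'] = qsplit s := by
  rw [PySem.Chars.splitOn, go_spec s (s.length + 1) [] [] (by omega)]
  cases qsplit s <;> simp

theorem qsplit_ne_nil (s : List Char) : qsplit s ≠ [] := by
  induction s with
  | nil => simp [qsplit]
  | cons c rest ih =>
    simp only [qsplit]
    split
    · simp
    · cases h : qsplit rest
      · exact absurd h ih
      · simp

theorem qsplit_no_quote (s : List Char) (h : '"' ∉ s) : qsplit s = [s] := by
  induction s with
  | nil => simp [qsplit]
  | cons c rest ih =>
    simp only [qsplit]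
    rw [if_neg (by simp at h; exact fun e => h.1 e.symm), ih (by simp at h; exact h.2)]
    simp

theorem qsplit_append (a b : List Char) (h : '"' ∉ a) :
    qsplit (a ++ '"' :: b) = a :: qsplit b := by
  induction a with
  | nil => simp [qsplit]
  | cons c a' ih =>
    simp only [List.cons_append, qsplit]
    rw [if_neg (by simp at h; exact fun e => h.1 e.symm), ih (by simp at h; exact h.2)]
    simp

theorem isIn_quote_iff (s : List Char) : PySem.Chars.isIn ['"'] s = true ↔ '"' ∈ s := by
  rw [PySem.Chars.isIn_iff_infix]
  constructor
  · intro hi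
    exact hi.mem (by simp)
  · intro hm
    obtain ⟨u, v, rfl⟩ := List.append_of_mem hm
    exact ⟨u, v, by simp⟩

theorem find_decomp (s : List Char) (h : PySem.Chars.isIn ['"'] s = true) :
    '"' ∉ s.take (PySem.Chars.find s ['"']).toNat ∧
      s = s.take (PySem.Chars.find s ['"']).toNat ++
          '"' :: s.drop ((PySem.Chars.find s ['"']).toNat + 1) := by
  have hf : 0 ≤ PySem.Chars.find s ['"'] :=
    (PySem.Chars.find_nonneg_iff _ _).mpr ((PySem.Chars.isIn_iff_infix _ _).mp h)
  obtain ⟨hpre, hmin⟩ := PySem.Chars.find_spec hf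
  set n := (PySem.Chars.find s ['"']).toNat with hn
  have hd : s.drop n = '"' :: s.drop (n + 1) := by
    obtain ⟨t, ht⟩ := hpre
    have : s.drop (n + 1) = t := by
      have := congrArg List.tail ht
      simpa [List.tail_drop] using this.symm
    rw [← this] at ht
    exact ht.symm
  constructor
  · intro hmem
    obtain ⟨i, hi, hv⟩ := List.mem_iff_getElem.mp hmem
    have hilen : i < s.length := by
      have := hi; simp [List.length_take] at this; omega
    have hin : i < n := by
      have := hi; simp [List.length_take] at this; omega
    apply hmin i hin
    rw [List.drop_eq_getElem_cons hilen]
    have : s[i] = '"' := by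
      rw [← hv]; simp [List.getElem_take]
    rw [this]
    exact ⟨_, rfl⟩
  · conv_lhs => rw [← List.take_append_drop n s]
    rw [hd]

theorem quote_step (s : List Char) (h : PySem.Chars.isIn ['"'] s = true) :
    PySem.List.slice s none (some (PySem.Chars.find s ['"'])) =
        s.take (PySem.Chars.find s ['"']).toNat ∧
    PySem.List.slice s (some (PySem.Chars.find s ['"'] + 1)) none =
        s.drop ((PySem.Chars.find s ['"']).toNat + 1) ∧
    qsplit s = s.take (PySem.Chars.find s ['"']).toNat ::
        qsplit (s.drop ((PySem.Chars.find s ['"']).toNat + 1)) := by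
  have hf : 0 ≤ PySem.Chars.find s ['"'] :=
    (PySem.Chars.find_nonneg_iff _ _).mpr ((PySem.Chars.isIn_iff_infix _ _).mp h)
  obtain ⟨hnq, hsplit⟩ := find_decomp s h
  refine ⟨PySem.List.slice_to s hf, ?_, ?_⟩
  · rw [PySem.List.slice_from s (by omega)]
    congr 1
    omega
  · conv_lhs => rw [hsplit]
    exact qsplit_append _ _ hnq

-- rfl unfolding equations for the structural walks (shape by shape)
theorem walkA_eq2 (keys : List (List Char)) (d : PySem.Dict (List Char) (List Char))
    (a t : List Char) : walkA keys d [a, t] = d := rfl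
theorem walkA_eq3 (keys : List (List Char)) (d : PySem.Dict (List Char) (List Char))
    (a t x : List Char) : walkA keys d [a, t, x] = d := rfl
theorem walkA_eq4 (keys : List (List Char)) (d : PySem.Dict (List Char) (List Char))
    (a t v w : List Char) (r : List (List Char)) : walkA keys d (a :: t :: v :: w :: r) =
      if keys.contains a then walkA keys (d.insert a v) (v :: w :: r)
      else walkA keys d (t :: v :: w :: r) := rfl
theorem walkA_not_key (keys : List (List Char)) (d : PySem.Dict (List Char) (List Char))
    (a t : List Char) (rest : List (List Char)) (hk : ¬ keys.contains a = true) :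
    walkA keys d (a :: t :: rest) = walkA keys d (t :: rest) := by
  match rest with
  | [] => rfl
  | [x] => rw [walkA_eq3, walkA_eq2]
  | v :: w :: r => rw [walkA_eq4, if_neg hk]

theorem walkB_eq2 (keys : List (List Char)) (d : PySem.Dict (List Char) (List Char))
    (a t : List Char) : walkB keys d [a, t] = d := rfl
theorem walkB_eq3 (keys : List (List Char)) (d : PySem.Dict (List Char) (List Char))
    (a t v : List Char) (r : List (List Char)) : walkB keys d (a :: t :: v :: r) =
      if keys.contains a then walkB keys (d.insert a v) (v :: r)
      else walkB keys d (t :: v :: r) := rfl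
theorem walkB_not_key (keys : List (List Char)) (d : PySem.Dict (List Char) (List Char))
    (a t : List Char) (rest : List (List Char)) (hk : ¬ keys.contains a = true) :
    walkB keys d (a :: t :: rest) = walkB keys d (t :: rest) := by
  match rest with
  | [] => rfl
  | v :: r => rw [walkB_eq3, if_neg hk]

theorem crashesA_eq2 (keys : List (List Char)) (a t : List Char) :
    crashesA keys [a, t] = keys.contains a := rfl
theorem crashesA_eq3 (keys : List (List Char)) (a t x : List Char) :
    crashesA keys [a, t, x] = (keys.contains a || keys.contains t) := rfl
theorem crashesA_eq4 (keys : List (List Char)) (a t v w : List Char) (r : List (List Char)) :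
    crashesA keys (a :: t :: v :: w :: r) =
      if keys.contains a then crashesA keys (v :: w :: r)
      else crashesA keys (t :: v :: w :: r) := rfl
theorem crashesA_not_key (keys : List (List Char)) (a t : List Char) (rest : List (List Char))
    (hk : ¬ keys.contains a = true) :
    crashesA keys (a :: t :: rest) = crashesA keys (t :: rest) := by
  match rest with
  | [] => rw [crashesA_eq2]; simp at hk; simp [hk, crashesA]
  | [x] => rw [crashesA_eq3, crashesA_eq2]; simp at hk; simp [hk]
  | v :: w :: r => rw [crashesA_eq4, if_neg hk]
theorem goA_eq_walkA_aux (keys : List (List Char)) : ∀ (N : Nat) (s : List Char),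
    s.length ≤ N → ∀ (d : PySem.Dict (List Char) (List Char)),
    goA keys d s = walkA keys d (qsplit s) := by
  intro N
  induction N with
  | zero =>
    intro s hlen d
    have hs : s = [] := List.eq_nil_of_length_eq_zero (by omega)
    subst hs
    rw [goA, dif_neg (by decide)]
    simp [qsplit, walkA]
  | succ N ih =>
    intro s hlen d
    by_cases hin : PySem.Chars.isIn ['"'] s = true
    · obtain ⟨e1, e2, hq⟩ := quote_step s hin
      have hlen1 : (s.drop ((PySem.Chars.find s ['"']).toNat + 1)).length ≤ N := by
        have := pvLenAfterQuote s hin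
        rw [e2] at this
        omega
      rw [goA, dif_pos hin]
      simp only [e1, e2]
      by_cases hk : keys.contains (s.take (PySem.Chars.find s ['"']).toNat) = true
      · rw [if_pos hk]
        set s1 := s.drop ((PySem.Chars.find s ['"']).toNat + 1) with hs1
        by_cases hin2 : PySem.Chars.isIn ['"'] s1 = true
        · rw [dif_pos hin2]
          obtain ⟨f1, f2, hq1⟩ := quote_step s1 hin2
          simp only [f2]
          set s2 := s1.drop ((PySem.Chars.find s1 ['"']).toNat + 1) with hs2
          by_cases hin3 : PySem.Chars.isIn ['"'] s2 = true
          · rw [if_pos hin3]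
            obtain ⟨g1, g2, hq2⟩ := quote_step s2 hin3
            simp only [g1]
            have hlen2 : s2.length ≤ N := by
              have := pvLenAfterQuote s1 hin2
              rw [f2] at this
              have h2 : s1.length ≤ s.length := by
                rw [hs1]; simp
              omega
            obtain ⟨u, rest2, hrest2⟩ : ∃ u rest2,
                qsplit (s2.drop ((PySem.Chars.find s2 ['"']).toNat + 1)) = u :: rest2 := by
              cases hq' : qsplit (s2.drop ((PySem.Chars.find s2 ['"']).toNat + 1)) with
              | nil => exact absurd hq' (qsplit_ne_nil _)
              | cons u rest2 => exact ⟨u, rest2, rfl⟩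
            rw [ih s2 hlen2 _]
            rw [hq, hq1, hq2, hrest2, walkA_eq4, if_pos hk, ← hrest2, ← hq2]
          · rw [if_neg hin3]
            -- Python raises here (no quote left for the value); stale d, matching walkA's [_] branch
            have hq2 : qsplit s2 = [s2] :=
              qsplit_no_quote s2 (by intro hm; exact hin3 ((isIn_quote_iff s2).mpr hm))
            rw [hq, hq1, hq2, walkA_eq3]
        · rw [dif_neg hin2]
          -- Python raises here (no quote after the key); stale d, matching walkA's [] branch
          have hq1 : qsplit s1 = [s1] :=
            qsplit_no_quote s1 (by intro hm; exact hin2 ((isIn_quote_iff s1).mpr hm))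
          rw [hq, hq1, walkA_eq2]
      · rw [if_neg hk]
        rw [ih _ hlen1 _, hq]
        obtain ⟨t, rest, hrest⟩ : ∃ t rest,
            qsplit (s.drop ((PySem.Chars.find s ['"']).toNat + 1)) = t :: rest := by
          cases hq' : qsplit (s.drop ((PySem.Chars.find s ['"']).toNat + 1)) with
          | nil => exact absurd hq' (qsplit_ne_nil _)
          | cons t rest => exact ⟨t, rest, rfl⟩
        rw [hrest, walkA_not_key _ _ _ _ _ hk]
    · rw [goA, dif_neg hin]
      have hnq : '"' ∉ s := fun hm => hin ((isIn_quote_iff s).mpr hm)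
      rw [qsplit_no_quote s hnq, walkA]

theorem goA_eq_walkA (keys : List (List Char)) (d : PySem.Dict (List Char) (List Char))
    (s : List Char) : goA keys d s = walkA keys d (qsplit s) :=
  goA_eq_walkA_aux keys s.length s le_rfl d

theorem contains_ofList (ks : List (List Char)) (x : List Char) :
    (PySem.Set.ofList ks).contains x = ks.contains x := by
  rw [PySem.Set.contains_eq_listContains]
  by_cases h : x ∈ ks <;>
    simp [h, PySem.Set.mem_ofList]

theorem walkB_short (ks : List (List Char)) (d : PySem.Dict (List Char) (List Char))
    (l : List (List Char)) (h : l.length ≤ 1) : walkB ks d l = d := by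
  match l with
  | [] => rfl
  | [x] => rfl
  | a :: b :: r => simp at h

theorem goB_eq_walkB_aux (ks : List (List Char)) (segs : List (List Char)) :
    ∀ (N i : Nat), segs.length ≤ i + N → ∀ (d : PySem.Dict (List Char) (List Char)),
    goB (PySem.Set.ofList ks) d segs i = walkB ks d (segs.drop i) := by
  intro N
  induction N with
  | zero =>
    intro i hlen d
    rw [goB, if_neg (by omega)]
    rw [walkB_short ks d _ (by simp; omega)]
  | succ N ih =>
    intro i hlen d
    by_cases h : i + 1 < segs.length
    · rw [goB, if_pos h]
      have e0 : segs[i]? = some segs[i] := List.getElem?_eq_getElem (by omega)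
      rw [e0]
      simp only [contains_ofList]
      have ed : segs.drop i = segs[i] :: segs[i + 1] :: segs.drop (i + 2) := by
        rw [List.drop_eq_getElem_cons (by omega), List.drop_eq_getElem_cons h]
      by_cases hk : ks.contains segs[i] = true
      · rw [if_pos hk]
        cases h2 : segs[i + 2]? with
        | none =>
          have hge : segs.length ≤ i + 2 := by
            by_contra hc
            rw [List.getElem?_eq_getElem (by omega)] at h2
            cases h2
          have h3 : segs.drop (i + 2) = [] := List.drop_eq_nil_of_le hge
          simp only []
          rw [ed, h3, walkB_eq2]
        | some v =>
          have hlt : i + 2 < segs.length := by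
            by_contra hc
            rw [List.getElem?_eq_none (by omega)] at h2
            cases h2
          have hv : v = segs[i + 2] := by
            rw [List.getElem?_eq_getElem hlt] at h2
            exact (Option.some_inj.mp h2).symm
          have ed2 : segs.drop (i + 2) = segs[i + 2] :: segs.drop (i + 3) :=
            List.drop_eq_getElem_cons hlt
          simp only []
          rw [ih (i + 2) (by omega) _, ed, ed2, walkB_eq3, if_pos hk, hv, ← ed2]
      · rw [if_neg hk, ih (i + 1) (by omega) _, ed]
        rw [List.drop_eq_getElem_cons h, walkB_not_key _ _ _ _ _ hk]
    · rw [goB, if_neg h]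
      rw [walkB_short ks d _ (by simp; omega)]

theorem goB_eq_walkB (ks : List (List Char)) (d : PySem.Dict (List Char) (List Char))
    (segs : List (List Char)) (i : Nat) :
    goB (PySem.Set.ofList ks) d segs i = walkB ks d (segs.drop i) :=
  goB_eq_walkB_aux ks segs segs.length i (by omega) d

-- on every non-crashing segment list the two abstract walks coincide
theorem walkA_eq_walkB (keys : List (List Char)) : ∀ (N : Nat) (l : List (List Char)),
    l.length ≤ N → crashesA keys l = false →
    ∀ (d : PySem.Dict (List Char) (List Char)), walkA keys d l = walkB keys d l := by
  intro N
  induction N with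
  | zero =>
    intro l hlen _ d
    have : l = [] := List.eq_nil_of_length_eq_zero (by omega)
    subst this
    rfl
  | succ N ih =>
    intro l hlen hc d
    match l with
    | [] => rfl
    | [x] => rfl
    | a :: t :: rest =>
      by_cases hk : keys.contains a = true
      · match rest with
        | [] =>
          rw [walkA_eq2, walkB_eq2]
        | [x] =>
          rw [crashesA_eq3, hk] at hc
          simp at hc
        | v :: w :: rest' =>
          rw [walkA_eq4, walkB_eq3, if_pos hk, if_pos hk]
          rw [crashesA_eq4, if_pos hk] at hc
          exact ih (v :: w :: rest') (by simp at hlen ⊢; omega) hc _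
      · rw [walkA_not_key _ _ _ _ _ hk, walkB_not_key _ _ _ _ _ hk]
        rw [crashesA_not_key _ _ _ _ hk] at hc
        exact ih (t :: rest) (by simp at hlen ⊢; omega) hc _

-- ===== VERDICT (by name: the statement is the Claim_ definition above) =====
theorem get_information_spec : Claim_equal_get_information := by
  unfold Claim_equal_get_information
  intro pattern_information information _hdom hpre
  unfold Pre_get_information at hpre
  rw [splitOn_eq_qsplit] at hpre
  unfold Spec_get_information get_information get_information_alt
  simp only []
  rw [goA_eq_walkA, goB_eq_walkB, List.drop_zero, splitOn_eq_qsplit,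
    walkA_eq_walkB _ (qsplit information.toList).length _ le_rfl hpre]
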